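-- pv_equiv track=rewrite | github.com/eyobmamo/competitive-programming | leetcode/maximum-score-after-splitting-a-string.py | maxScore
-- ===== SOURCE A (Python) =====
-- def maxScore(s: str) -> int:
--     cnt_one=s.count("1")
--     max1=cnt_one
--     max0=0
--     res=0
--     for c in s[:len(s)-1]:
--         if c == "1":
--             max1-=1
--         else:
--             max0+=1
--         res=max(res,max0+max1)
--     return res
-- ===== SOURCE B (Python) =====
-- def maxScore(s: str) -> int:
--     n = len(s)
--     # zeros[i] = number of non-'1' characters in s[:i]  (prefix table, built left to right)
--     zeros = [0] * (n + 1)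
--     for i in range(n):
--         zeros[i + 1] = zeros[i] + (0 if s[i] == "1" else 1)
--     # ones[i] = number of '1' characters in s[i:]  (suffix table, built right to left)
--     ones = [0] * (n + 1)
--     for i in range(n - 1, -1, -1):
--         ones[i] = ones[i + 1] + (1 if s[i] == "1" else 0)
--     return max((zeros[i] + ones[i] for i in range(1, n)), default=0)
-- ===== Notes on version B (the rewrite author's own statement) =====
-- stated objective: alternative
-- what changed: Replaced A's single pass with inline running counters (res updated per character) by a two-phase table method: build a prefix table of zero-counts and a suffix table of one-counts, then scan the split points 1..n-1 taking the max of zeros[i]+ones[i], default 0.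
import Mathlib
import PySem

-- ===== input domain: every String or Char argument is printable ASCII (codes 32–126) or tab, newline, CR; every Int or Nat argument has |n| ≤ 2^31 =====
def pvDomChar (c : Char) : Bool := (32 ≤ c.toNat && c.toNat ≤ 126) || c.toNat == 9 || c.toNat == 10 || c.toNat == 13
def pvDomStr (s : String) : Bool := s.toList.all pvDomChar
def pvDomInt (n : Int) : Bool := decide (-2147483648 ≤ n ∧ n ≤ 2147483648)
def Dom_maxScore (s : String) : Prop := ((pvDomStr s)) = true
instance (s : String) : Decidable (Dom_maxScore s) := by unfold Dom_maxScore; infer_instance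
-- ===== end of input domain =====

-- B replaces A's single running-counter pass with a two-phase method: prefix/suffix count tables,
-- then a scan over split points (an alternative decomposition, same O(n) cost).

-- ===== PORT A =====
def maxScore (s : String) : Int :=
  let cnt_one : Int := (PySem.Str.count s "1" : Int)
  let st := (PySem.List.slice s.toList none (some (PySem.Str.len s - 1))).foldl
      (fun (st : Int × Int × Int) c =>
        let p := if c = '1' then (st.1 - 1, st.2.1) else (st.1, st.2.1 + 1)
        (p.1, p.2, max st.2.2 (p.2 + p.1)))
      (cnt_one, 0, 0)
  st.2.2

-- ===== PORT B =====
-- prefix table zeros[0..n], built left to right (zeros[i] = count of zero-characters in s[:i])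
def pvBuildZeros : List Char → Int → List Int
  | [], z => [z]
  | c :: cs, z => z :: pvBuildZeros cs (z + (if c = '1' then 0 else 1))
-- suffix table ones[0..n], built right to left (ones[i] = count of one-characters in s[i:])
def pvBuildOnes : List Char → List Int
  | [] => [0]
  | c :: cs =>
    let rest := pvBuildOnes cs
    ((if c = '1' then 1 else 0) + rest.headI) :: rest

def maxScore_alt (s : String) : Int :=
  let l := s.toList
  let zeros := pvBuildZeros l 0
  let ones := pvBuildOnes l
  let terms := (PySem.List.pyRange 1 (l.length : Int) 1).map
      (fun i => PySem.List.pyGetD zeros i 0 + PySem.List.pyGetD ones i 0)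
  PySem.List.maxD terms (fun x => x) 0


-- ===== PRECONDITION & SPEC =====
def Spec_maxScore (s : String) (out : Int) : Prop := out = maxScore_alt s
instance (s : String) (out : Int) : Decidable (Spec_maxScore s out) := by unfold Spec_maxScore; infer_instance

-- ===== CLAIM (what is proved, stated in full; the proofs are below) =====
def Claim_equal_maxScore : Prop := ∀ (s : String), Dom_maxScore s → Spec_maxScore s (maxScore s)

-- ===== LEMMAS AND PROOFS =====

-- pvZ p / pvO p: the number of zero-characters / one-characters of p, as Int (the split scores)
def pvZ (p : List Char) : Int := (p.countP (fun c => !(c == '1')) : Int)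
def pvO (p : List Char) : Int := (p.count '1' : Int)
theorem pvZ_cons (c : Char) (p : List Char) :
    pvZ (c :: p) = (if c = '1' then 0 else 1) + pvZ p := by
  simp [pvZ, List.countP_cons]
  by_cases h : c = '1' <;> simp [h] <;> try omega
theorem pvO_cons (c : Char) (p : List Char) :
    pvO (c :: p) = (if c = '1' then 1 else 0) + pvO p := by
  simp [pvO, List.count_cons]
  by_cases h : c = '1' <;> simp [h] <;> try omega
theorem pvZ_nonneg (p : List Char) : 0 ≤ pvZ p := by simp [pvZ]
theorem pvO_nonneg (p : List Char) : 0 ≤ pvO p := by simp [pvO]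


theorem getD_buildZeros (l : List Char) (z : Int) (k : Nat) (hk : k ≤ l.length) :
    (pvBuildZeros l z).getD k 0 = z + pvZ (l.take k) := by
  induction l generalizing z k with
  | nil =>
    simp only [List.length_nil, Nat.le_zero] at hk
    subst hk; simp [pvBuildZeros, pvZ]
  | cons c cs ih =>
    cases k with
    | zero => simp [pvBuildZeros, pvZ]
    | succ k =>
      simp only [pvBuildZeros, List.getD_cons_succ, List.take_succ_cons, pvZ_cons]
      rw [ih _ k (by simpa using hk)]
      ring
theorem headI_buildOnes (l : List Char) : (pvBuildOnes l).headI = pvO l := by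
  cases l with
  | nil => simp [pvBuildOnes, pvO]
  | cons c cs => simp [pvBuildOnes, pvO_cons, headI_buildOnes cs]
theorem getD_buildOnes (l : List Char) (k : Nat) (hk : k ≤ l.length) :
    (pvBuildOnes l).getD k 0 = pvO (l.drop k) := by
  induction l generalizing k with
  | nil =>
    simp only [List.length_nil, Nat.le_zero] at hk
    subst hk; simp [pvBuildOnes, pvO]
  | cons c cs ih =>
    cases k with
    | zero =>
      simp only [pvBuildOnes, List.getD_cons_zero, List.drop_zero, pvO_cons]
      rw [headI_buildOnes cs]
    | succ k =>
      simp only [pvBuildOnes, List.getD_cons_succ, List.drop_succ_cons]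
      exact ih k (by simpa using hk)

theorem pvO_split (l : List Char) (i : Nat) : pvO l = pvO (l.take i) + pvO (l.drop i) := by
  simp only [pvO]
  rw [← Nat.cast_add, ← List.count_append, List.take_append_drop]

theorem maxD_nonneg (terms : List Int) (h : ∀ x ∈ terms, 0 ≤ x) :
    PySem.List.maxD terms (fun x => x) 0 = terms.foldl max 0 := by
  cases terms with
  | nil => simp [PySem.List.maxD, PySem.List.max?]
  | cons x t =>
    have hx : 0 ≤ x := h x (by simp)
    simp only [PySem.List.maxD, PySem.List.max?_id_cons, Option.getD_some, List.foldl_cons]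
    rw [max_eq_right hx]

theorem slice_pred (l : List Char) :
    PySem.List.slice l none (some ((l.length : Int) - 1)) = l.dropLast := by
  cases l with
  | nil => simpa using PySem.List.slice_to_neg_one ([] : List Char)
  | cons x t =>
    have h : (((x :: t).length : Int)) - 1 = ((t.length : Nat) : Int) := by
      simp
    rw [h, PySem.List.slice_to_natCast, List.dropLast_eq_take]
    simp

theorem count_go_single (c : Char) :
    ∀ (fuel : Nat) (l : List Char) (acc : Nat), l.length ≤ fuel →
      PySem.Chars.count.go [c] fuel l acc = acc + l.count c := by
  intro fuel
  induction fuel with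
  | zero =>
    intro l acc h
    cases l with
    | nil => simp [PySem.Chars.count.go]
    | cons x t => simp at h
  | succ n ih =>
    intro l acc h
    cases l with
    | nil => simp [PySem.Chars.count.go]
    | cons x t =>
      by_cases hx : c = x
      · have hp : List.isPrefixOf [c] (x :: t) = true := by simp [List.isPrefixOf, hx]
        have hgo : PySem.Chars.count.go [c] (n+1) (x :: t) acc
            = PySem.Chars.count.go [c] n t (acc + 1) := by
          simp [PySem.Chars.count.go, hp]
        rw [hgo, ih t (acc + 1) (by simpa using Nat.le_of_succ_le_succ h)]
        simp [hx.symm]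
        omega
      · have hp : List.isPrefixOf [c] (x :: t) = false := by
          simp [List.isPrefixOf]; exact Ne.intro hx
        have hgo : PySem.Chars.count.go [c] (n+1) (x :: t) acc
            = PySem.Chars.count.go [c] n t acc := by
          simp [PySem.Chars.count.go, hp]
        rw [hgo, ih t acc (by simpa using Nat.le_of_succ_le_succ h)]
        simp [Ne.symm hx]

theorem chars_count_one (l : List Char) : PySem.Chars.count l ['1'] = l.count '1' := by
  simp only [PySem.Chars.count, List.isEmpty_cons, Bool.false_eq_true, if_false]
  simpa using count_go_single '1' l.length l 0 (le_refl _)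

theorem foldA (t : List Char) (m1 m0 r : Int) :
    ((t.foldl
        (fun (st : Int × Int × Int) c =>
          let p := if c = '1' then (st.1 - 1, st.2.1) else (st.1, st.2.1 + 1)
          (p.1, p.2, max st.2.2 (p.2 + p.1)))
        (m1, m0, r))).2.2
    = (List.range t.length).foldl
        (fun acc k => max acc (m1 + m0 + pvZ (t.take (k+1)) - pvO (t.take (k+1)))) r := by
  induction t generalizing m1 m0 r with
  | nil => simp
  | cons c t ih =>
    rw [List.length_cons, List.range_succ_eq_map, List.foldl_cons, List.foldl_cons,
      List.foldl_map]
    by_cases hc : c = '1'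
    · simp only [hc, reduceIte]
      rw [ih]
      have hfun : (fun (acc : Int) (k : Nat) => max acc ((m1 - 1) + m0 + pvZ (t.take (k+1)) - pvO (t.take (k+1))))
          = (fun (acc : Int) (k : Nat) => max acc (m1 + m0 + pvZ ((('1':Char) :: t).take (k.succ+1)) - pvO ((('1':Char) :: t).take (k.succ+1)))) := by
        funext acc k
        simp only [Nat.succ_eq_add_one, List.take_succ_cons, pvZ_cons, pvO_cons, reduceIte]
        congr 1; ring
      have hinit : max r (m0 + (m1 - 1)) = max r (m1 + m0 + pvZ ((('1':Char) :: t).take (0+1)) - pvO ((('1':Char) :: t).take (0+1))) := by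
        simp [pvZ, pvO]; congr 1; omega
      rw [← hinit, ← hfun]
    · simp only [if_neg hc]
      rw [ih]
      have hfun : (fun (acc : Int) (k : Nat) => max acc (m1 + (m0 + 1) + pvZ (t.take (k+1)) - pvO (t.take (k+1))))
          = (fun (acc : Int) (k : Nat) => max acc (m1 + m0 + pvZ ((c :: t).take (k.succ+1)) - pvO ((c :: t).take (k.succ+1)))) := by
        funext acc k
        simp only [Nat.succ_eq_add_one, List.take_succ_cons, pvZ_cons, pvO_cons, if_neg hc]
        congr 1; ring
      have hinit : max r (m0 + 1 + m1) = max r (m1 + m0 + pvZ ((c :: t).take (0+1)) - pvO ((c :: t).take (0+1))) := by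
        simp [pvZ, pvO, hc]; congr 1; omega
      rw [← hinit, ← hfun]


theorem maxScore_eq (s : String) : maxScore s = maxScore_alt s := by
  have hcnt : (PySem.Str.count s "1" : Int) = pvO s.toList := by
    have h1 : PySem.Str.count s "1" = PySem.Chars.count s.toList ['1'] := by
      simp [PySem.Str.count]
    rw [pvO, h1, chars_count_one]
  have hA : maxScore s
      = (List.range s.toList.dropLast.length).foldl
          (fun acc k => max acc (pvO s.toList + pvZ (s.toList.dropLast.take (k+1)) - pvO (s.toList.dropLast.take (k+1)))) 0 := by
    show ((PySem.List.slice s.toList none (some (PySem.Str.len s - 1))).foldl _ ((PySem.Str.count s "1" : Int), 0, 0)).2.2 = _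
    rw [PySem.Str.len_eq, slice_pred, hcnt, foldA]
    simp only [add_zero]
  have htake : ∀ k ∈ List.range s.toList.dropLast.length, ∀ acc : Int,
      max acc (pvO s.toList + pvZ (s.toList.dropLast.take (k+1)) - pvO (s.toList.dropLast.take (k+1)))
      = max acc (pvZ (s.toList.take (k+1)) + pvO (s.toList.drop (k+1))) := by
    intro k hk acc
    have hk' : k + 1 ≤ s.toList.length - 1 := by
      simp only [List.mem_range, List.length_dropLast] at hk; omega
    have hdt : s.toList.dropLast.take (k+1) = s.toList.take (k+1) := by
      rw [List.dropLast_eq_take, List.take_take]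
      congr 1; omega
    rw [hdt]
    have hsplit := pvO_split s.toList (k+1)
    congr 1; omega
  rw [PySem.List.foldl_congr_mem' _ _ _ _ htake] at hA
  have hnn : ∀ x ∈ (PySem.List.pyRange 1 (s.toList.length : Int) 1).map
      (fun i => PySem.List.pyGetD (pvBuildZeros s.toList 0) i 0 + PySem.List.pyGetD (pvBuildOnes s.toList) i 0), 0 ≤ x := by
    intro x hx
    rcases List.mem_map.mp hx with ⟨i, hi, rfl⟩
    rw [PySem.List.pyRange_one] at hi
    rcases List.mem_map.mp hi with ⟨k, hk, rfl⟩
    have hk' : k + 1 ≤ s.toList.length := by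
      simp only [List.mem_range] at hk; omega
    have h1 : (1 : Int) + (k : Nat) = ((k + 1 : Nat) : Int) := by push_cast; ring
    rw [h1, PySem.List.pyGetD_natCast, PySem.List.pyGetD_natCast,
      getD_buildZeros s.toList 0 (k+1) hk', getD_buildOnes s.toList (k+1) hk']
    have h2 := pvZ_nonneg (s.toList.take (k+1))
    have h3 := pvO_nonneg (s.toList.drop (k+1))
    omega
  have hB : maxScore_alt s
      = ((PySem.List.pyRange 1 (s.toList.length : Int) 1).map
          (fun i => PySem.List.pyGetD (pvBuildZeros s.toList 0) i 0 + PySem.List.pyGetD (pvBuildOnes s.toList) i 0)).foldl max 0 := by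
    show PySem.List.maxD _ _ _ = _
    exact maxD_nonneg _ hnn
  rw [hA, hB, List.foldl_map, PySem.List.pyRange_one, List.foldl_map]
  have hn : ((s.toList.length : Int) - 1).toNat = s.toList.dropLast.length := by
    simp only [List.length_dropLast]; omega
  rw [hn]
  apply (PySem.List.foldl_congr_mem' _ _ _ _ _)
  intro k hk acc
  have hk' : k + 1 ≤ s.toList.length := by
    simp only [List.mem_range, List.length_dropLast] at hk; omega
  have h1 : (1 : Int) + (k : Nat) = ((k + 1 : Nat) : Int) := by push_cast; ring
  rw [h1, PySem.List.pyGetD_natCast, PySem.List.pyGetD_natCast,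
    getD_buildZeros s.toList 0 (k+1) hk', getD_buildOnes s.toList (k+1) hk']
  congr 1; ring

-- ===== VERDICT (by name: the statement is the Claim_ definition above) =====
theorem maxScore_spec : Claim_equal_maxScore := by
  intro s _
  unfold Spec_maxScore
  exact maxScore_eq s
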